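-- pv_equiv track=rewrite | github.com/Anass508/Python-KNN-Choixpeau-Magique-S1.02 | s102.py | NN_house
-- ===== SOURCE A (Python) =====
-- def NN_house(neighbors):
--
--     """
--     Cette fonction calcule la maison du plus proche voisin dans neighbors .
--
--     neighbors (list) : un tableau de références trié du plus proche au moins proche voisins .
--
--     (str) : renvoie la maison du plus proche voisin .
--
--     """
--
--     # cas de valeur vide en paramètre .
--     if neighbors==[]:
--         return False
--
--     dico = {}
--
--     # Calcule du nombre d'occurrences pour chaque maison présente dans les voisins .
--     for i in range(len(neighbors)):
--
--         maison = neighbors[i]["house"]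
--
--         if maison not in dico:
--
--             dico[maison] = 1 # Initialiser  le compteur à 1 lors de la première rencontre de la maison .
--
--         else:
--
--             dico[maison] += 1 # incrémentation si une nouvelle occurrence de la maison (déjà connue) .
--
--     maxi = 0 # initialisation du plus grand nombre d'occurence de maison .
--
--     for v in dico.values():
--
--         if v >= maxi:
--
--             maxi = v #stocke la plus grande occurence de maison rencontrée .
--
--     # Initialisation d'un tableau contant la ou les maisons (cas égalité) avec la plus grand occurence .
--     maison_gagnante = []
--
--     for cle in dico.keys():
--
--         if dico[cle] == maxi:
--
--             maison_gagnante.append(cle)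
--
--     for i in range(len(neighbors)): # Parcours du tableau neighbors pour définire le gagnant en cas d'égalité
--
--         if neighbors[i]["house"] in maison_gagnante:
--
--             # Retourne la première maison rencontré contenue aussi dans le tableau maison_gagnant
--             return neighbors[i]["house"]
-- ===== SOURCE B (Python) =====
-- def NN_house(neighbors):
--     # Count occurrences in one pass, then a single strict-greater scan over the
--     # dict items: insertion order = first-appearance order, so the earliest
--     # house wins ties, matching the original's final rescan of neighbors.
--     if neighbors == []:
--         return False
--     counts = {}
--     for n in neighbors:
--         h = n["house"]
--         counts[h] = counts.get(h, 0) + 1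
--     best, best_count = None, 0
--     for h, c in counts.items():
--         if c > best_count:
--             best, best_count = h, c
--     return best
-- ===== Notes on version B (the rewrite author's own statement) =====
-- stated objective: simpler
-- what changed: Replaces A's three post-passes (max over values, collecting the list of tied winners, rescanning neighbors for the first winner) with one strict-greater scan over the count dict's items, using dict insertion order (= first-appearance order) for the tie-break.
-- outside the precondition, e.g. on NN_house([]): A returns False, B returns False
import Mathlib
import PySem

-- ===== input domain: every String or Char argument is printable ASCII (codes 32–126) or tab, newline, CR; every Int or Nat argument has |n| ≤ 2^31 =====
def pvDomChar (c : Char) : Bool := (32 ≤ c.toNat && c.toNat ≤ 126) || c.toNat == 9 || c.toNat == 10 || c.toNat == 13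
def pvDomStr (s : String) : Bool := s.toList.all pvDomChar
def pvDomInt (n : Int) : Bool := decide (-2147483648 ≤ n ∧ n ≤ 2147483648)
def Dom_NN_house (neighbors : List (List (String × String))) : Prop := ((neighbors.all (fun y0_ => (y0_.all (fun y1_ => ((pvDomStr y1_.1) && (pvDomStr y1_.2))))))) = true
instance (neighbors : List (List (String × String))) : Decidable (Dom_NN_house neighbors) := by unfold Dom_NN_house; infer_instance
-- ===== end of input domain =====

-- B changes the winner selection (one strict-greater scan over the dict items instead of
-- max + tied-winner list + rescan of neighbors); equivalence of the RETURN value is proved on Pre_.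

-- ===== PORT A =====
-- n["house"] : first-match lookup in the neighbor's association list (exact where the key exists; Pre_ guarantees that)
def pvHouse (n : List (String × String)) : String :=
  (((n.find? (fun p => p.1 == "house")).map (fun p => p.2)).getD "")

-- A's final loop: 'for i in range(len(neighbors)): if neighbors[i]["house"] in maison_gagnante: return …'
def pvLastLoop (winners : List String) : List (List (String × String)) → Option String
  | [] => none
  | n :: rest => if winners.contains (pvHouse n) then some (pvHouse n) else pvLastLoop winners rest

def NN_house (neighbors : List (List (String × String))) : Option String :=
  if neighbors = [] then none
  else
    let dico := neighbors.foldl (fun d n =>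
      let maison := pvHouse n
      if !(d.contains maison) then d.insert maison (1 : Int)
      else d.insert maison (d.getD maison 0 + 1)) PySem.Dict.empty
    let maxi := (PySem.Dict.values dico).foldl (fun maxi v => if v ≥ maxi then v else maxi) (0 : Int)
    let winners := (PySem.Dict.keys dico).foldl
      (fun acc cle => if dico.getD cle 0 = maxi then acc ++ [cle] else acc) ([] : List String)
    pvLastLoop winners neighbors

-- ===== PORT B =====
def NN_house_alt (neighbors : List (List (String × String))) : Option String :=
  if neighbors = [] then none
  else
    let counts := neighbors.foldl (fun d n =>
      let h := pvHouse n
      d.insert h (d.getD h 0 + 1)) PySem.Dict.empty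
    (counts.items.foldl (fun best kv => if kv.2 > best.2 then (some kv.1, kv.2) else best)
      ((none : Option String), (0 : Int))).1

-- ===== PRECONDITION & SPEC =====
-- Pre_ excludes the empty list (A returns False, not a string) and any neighbor without a
-- "house" key (A raises KeyError).
def Pre_NN_house (neighbors : List (List (String × String))) : Prop :=
  neighbors ≠ [] ∧ ∀ n ∈ neighbors, (n.find? (fun p => p.1 == "house")).isSome = true
instance (neighbors : List (List (String × String))) : Decidable (Pre_NN_house neighbors) := by
  unfold Pre_NN_house; infer_instance
def pvWitness_NN_house : (List (List (String × String))) := [[("house", "G")], [("house", "S")], [("house", "G")]]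

def Spec_NN_house (neighbors : List (List (String × String))) (out : Option String) : Prop := out = NN_house_alt neighbors
instance (neighbors : List (List (String × String))) (out : Option String) : Decidable (Spec_NN_house neighbors out) := by unfold Spec_NN_house; infer_instance

-- ===== CLAIM (what is proved, stated in full; the proofs are below) =====
def Claim_equal_NN_house : Prop := ∀ (neighbors : List (List (String × String))), Dom_NN_house neighbors → Pre_NN_house neighbors → Spec_NN_house neighbors (NN_house neighbors)

-- ===== LEMMAS AND PROOFS =====

-- the running max with strict '>' (B) and with '≥' (A's maxi loop) agree
theorem pv_max_fold_eq (l : List Int) (m : Int) :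
    l.foldl (fun m v => if v ≥ m then v else m) m = l.foldl (fun m v => if v > m then v else m) m := by
  induction l generalizing m with
  | nil => rfl
  | cons v t ih =>
    simp only [List.foldl_cons]
    have : (if v ≥ m then v else m) = (if v > m then v else m) := by split_ifs <;> omega
    rw [this, ih]

theorem pv_le_max_fold (l : List Int) (m : Int) : m ≤ l.foldl (fun m v => if v > m then v else m) m := by
  induction l generalizing m with
  | nil => simp
  | cons v t ih =>
    simp only [List.foldl_cons]
    refine le_trans ?_ (ih _)
    split_ifs <;> omega

theorem pv_mem_le_max_fold (l : List Int) (m : Int) (v : Int) (hv : v ∈ l) :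
    v ≤ l.foldl (fun m v => if v > m then v else m) m := by
  induction l generalizing m with
  | nil => simp at hv
  | cons w t ih =>
    simp only [List.foldl_cons]
    rcases List.mem_cons.mp hv with h | h
    · subst h
      refine le_trans ?_ (pv_le_max_fold t _)
      split_ifs <;> omega
    · exact ih _ h

-- B's fold characterised: first element attaining the running max (when the max moved)
theorem pv_le_max_fold_pair {α : Type} (l : List (α × Int)) (m : Int) :
    m ≤ l.foldl (fun m kv => if kv.2 > m then kv.2 else m) m := by
  rw [← List.foldl_map (f := Prod.snd) (g := fun m v => if v > m then v else m)]
  exact pv_le_max_fold _ _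

theorem pv_argmax_fold {α : Type} (l : List (α × Int)) (b : Option α) (m : Int) :
    l.foldl (fun best kv => if kv.2 > best.2 then (some kv.1, kv.2) else best) (b, m) =
      (if l.foldl (fun m kv => if kv.2 > m then kv.2 else m) m = m then (b, m)
       else ((l.find? (fun kv => kv.2 = l.foldl (fun m kv => if kv.2 > m then kv.2 else m) m)).map Prod.fst,
             l.foldl (fun m kv => if kv.2 > m then kv.2 else m) m)) := by
  induction l generalizing b m with
  | nil => simp
  | cons kv t ih =>
    simp only [List.foldl_cons]
    by_cases h : kv.2 > m
    · simp only [if_pos h]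
      rw [ih]
      have hle := pv_le_max_fold_pair t kv.2
      generalize hF : t.foldl (fun m kv => if kv.2 > m then kv.2 else m) kv.2 = F at hle ⊢
      rw [if_neg (by omega : ¬ F = m)]
      by_cases he : F = kv.2
      · rw [if_pos he, List.find?_cons]
        have hdec : (decide (kv.2 = F)) = true := by simp [he]
        rw [hdec]
        simp [he]
      · rw [if_neg he, List.find?_cons]
        have hdec : (decide (kv.2 = F)) = false := by
          simp only [decide_eq_false_iff_not]; omega
        rw [hdec]
    · simp only [if_neg h]
      rw [ih]
      have hge := pv_le_max_fold_pair t m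
      generalize hF : t.foldl (fun m kv => if kv.2 > m then kv.2 else m) m = F at hge ⊢
      by_cases he : F = m
      · rw [if_pos he, if_pos he]
      · rw [if_neg he, if_neg he, List.find?_cons]
        have hdec : (decide (kv.2 = F)) = false := by
          simp only [decide_eq_false_iff_not]; omega
        rw [hdec]

-- the max fold over items equals the max fold over values (snd components)
theorem pv_max_fold_map {α : Type} (l : List (α × Int)) (m : Int) :
    (l.map Prod.snd).foldl (fun m v => if v > m then v else m) m
      = l.foldl (fun m kv => if kv.2 > m then kv.2 else m) m := by
  rw [List.foldl_map]

-- A's winners loop is a filter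
theorem pv_winners_filter (keys : List String) (f : String → Int) (maxi : Int) :
    keys.foldl (fun acc cle => if f cle = maxi then acc ++ [cle] else acc) ([] : List String)
      = keys.filter (fun cle => f cle = maxi) := by
  simpa using PySem.List.foldl_append_if (fun cle => decide (f cle = maxi)) id keys []

-- A's last loop is a find? over the mapped houses
theorem pv_lastLoop_find (winners : List String) (neighbors : List (List (String × String))) :
    pvLastLoop winners neighbors = (neighbors.map pvHouse).find? (fun h => winners.contains h) := by
  induction neighbors with
  | nil => rfl
  | cons n rest ih => simp only [pvLastLoop, List.map_cons, List.find?_cons]; split <;> simp_all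

-- find? sees through a filter that keeps everything the predicate can hit
theorem pv_find?_filter {α : Type} (l : List α) (p q : α → Bool) (h : ∀ x, p x = true → q x = true) :
    (l.filter q).find? p = l.find? p := by
  induction l with
  | nil => rfl
  | cons x t ih =>
    by_cases hq : q x = true
    · simp only [List.filter_cons, hq, if_true, List.find?_cons]
      split <;> simp_all
    · have hp : p x = false := by
        cases hpx : p x
        · rfl
        · exact absurd (h x hpx) hq
      simp only [List.filter_cons, hq, List.find?_cons, hp]
      exact ih

-- find? over a list equals find? over its set of first occurrences
theorem pv_find?_ofList (l : List String) (p : String → Bool) :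
    l.find? p = (PySem.Set.ofList l).find? p := by
  induction l with
  | nil => rfl
  | cons x t ih =>
    rw [PySem.Set.ofList_cons]
    simp only [List.find?_cons]
    cases hp : p x with
    | true => rfl
    | false =>
      rw [ih]
      have hd : (PySem.Set.ofList t).discard x = (PySem.Set.ofList t).filter (fun y => !(y == x)) := by
        simp [PySem.Set.discard]
      rw [hd, pv_find?_filter]
      intro y hy
      simp only [Bool.not_eq_eq_eq_not, Bool.not_true, beq_eq_false_iff_ne, ne_eq]
      intro he
      subst he
      rw [hp] at hy
      exact Bool.false_ne_true hy

-- find? respects pointwise-equal predicates on members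
theorem pv_find?_congr {α : Type} (l : List α) (p q : α → Bool) (h : ∀ x ∈ l, p x = q x) :
    l.find? p = l.find? q := by
  induction l with
  | nil => rfl
  | cons x t ih =>
    simp only [List.find?_cons, h x (List.mem_cons_self ..)]
    split
    · rfl
    · exact ih (fun y hy => h y (List.mem_cons_of_mem _ hy))


theorem pv_dicoA (neighbors : List (List (String × String))) :
    neighbors.foldl (fun d n =>
      let maison := pvHouse n
      if !(d.contains maison) then d.insert maison (1 : Int)
      else d.insert maison (d.getD maison 0 + 1)) PySem.Dict.empty
    = PySem.Dict.counter (neighbors.map pvHouse) := by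
  rw [← PySem.Dict.foldl_insert_getD_add_one_eq_counter, List.foldl_map]
  congr 1
  funext d n
  by_cases h : d.contains (pvHouse n)
  · simp [h]
  · have h' : d.contains (pvHouse n) = false := by simpa using h
    simp [h', PySem.Dict.getD_of_not_contains d (0:Int) h']

theorem pv_dicoB (neighbors : List (List (String × String))) :
    neighbors.foldl (fun d n =>
      let h := pvHouse n
      d.insert h (d.getD h 0 + 1)) PySem.Dict.empty
    = PySem.Dict.counter (neighbors.map pvHouse) := by
  rw [← PySem.Dict.foldl_insert_getD_add_one_eq_counter, List.foldl_map]

-- ===== VERDICT (by name: the statement is the Claim_ definition above) =====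
theorem NN_house_spec : Claim_equal_NN_house := by
  intro neighbors _ hpre
  unfold Spec_NN_house NN_house NN_house_alt
  obtain ⟨hne, -⟩ := hpre
  simp only [if_neg hne, pv_dicoA, pv_dicoB]
  set hs := List.map pvHouse neighbors with hhs
  have hs_ne : hs ≠ [] := by
    simp only [hhs, ne_eq, List.map_eq_nil_iff]
    exact hne
  have hvals : (PySem.Dict.counter hs).values
      = (PySem.Set.ofList hs).map (fun k => (hs.count k : Int)) := by
    rw [PySem.Dict.values_eq_map_keys _ (PySem.Dict.nodup_keys_counter hs) (0 : Int)]
    simp [PySem.Dict.keys_counter, PySem.Dict.getD_counter]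
  rw [hvals, PySem.Dict.keys_counter, PySem.Dict.items_counter]
  simp only [PySem.Dict.getD_counter]
  rw [pv_argmax_fold]
  have hMeq : (((PySem.Set.ofList hs).map (fun k => (k, (hs.count k : Int)))).foldl
        (fun m kv => if kv.2 > m then kv.2 else m) 0)
      = ((PySem.Set.ofList hs).map (fun k => (hs.count k : Int))).foldl
        (fun maxi v => if v ≥ maxi then v else maxi) 0 := by
    rw [pv_max_fold_eq, ← pv_max_fold_map, List.map_map]
    rfl
  rw [hMeq]
  set M := ((PySem.Set.ofList hs).map (fun k => (hs.count k : Int))).foldl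
      (fun maxi v => if v ≥ maxi then v else maxi) 0 with hM
  obtain ⟨k0, t0, hk0⟩ := List.exists_cons_of_ne_nil hs_ne
  have hk0mem : k0 ∈ hs := hk0 ▸ List.mem_cons_self ..
  have hk0S : k0 ∈ PySem.Set.ofList hs := (PySem.Set.mem_ofList ..).mpr hk0mem
  have hcnt : (1 : Int) ≤ (hs.count k0 : Int) := by
    exact_mod_cast List.count_pos_iff.mpr hk0mem
  have h1M : (1 : Int) ≤ M := by
    refine le_trans hcnt ?_
    rw [hM, pv_max_fold_eq]
    exact pv_mem_le_max_fold _ _ _ (List.mem_map_of_mem hk0S)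
  rw [if_neg (show ¬ M = 0 by omega)]
  rw [pv_winners_filter, pv_lastLoop_find, ← hhs, pv_find?_ofList]
  have hcongr : ∀ k ∈ PySem.Set.ofList hs,
      (((PySem.Set.ofList hs).filter (fun cle => decide ((hs.count cle : Int) = M))).contains k)
        = decide ((hs.count k : Int) = M) := by
    intro k hk
    by_cases hp : ((hs.count k : Int) = M)
    · simp [List.mem_filter, hk, hp]
    · simp [List.mem_filter, hp]
  rw [pv_find?_congr _ _ _ hcongr]
  rw [List.find?_map]
  simp [Function.comp_def]
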